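-- pv_equiv track=rewrite | github.com/htoyll8/D-Caps | main2.py | createClickableSketch
-- ===== SOURCE A (Python) =====
-- def createClickableSketch(host, version, sketch_id, sketch):
--     hole_counter = 0
--     updated_sketch = ""
--     # Store the indices of the holes in the sketch.
--     for ch in sketch:
--         if(ch == '?'):
--             updated_sketch += f'<a href="{host}/oversynth/api/{version}/sketches/{sketch_id}/{hole_counter}">?</a>'
--             hole_counter += 1
--         else:
--             updated_sketch += ch
--     return updated_sketch
-- ===== SOURCE B (Python) =====
-- def createClickableSketch(host, version, sketch_id, sketch):
--     # Split on the holes: the '?' separators are exactly the holes, in order.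
--     parts = sketch.split('?')
--     pieces = [parts[0]]
--     for i, seg in enumerate(parts[1:]):
--         pieces.append(f'<a href="{host}/oversynth/api/{version}/sketches/{sketch_id}/{i}">?</a>')
--         pieces.append(seg)
--     return ''.join(pieces)
-- ===== Notes on version B (the rewrite author's own statement) =====
-- stated objective: simpler
-- what changed: Replaces the per-character accumulation loop (counter + string +=) by splitting the sketch on '?' once and joining the segments with anchors whose index is the segment's position, so the loop runs over holes/segments instead of characters (bulk split/join in C instead of quadratic string +=).
import Mathlib
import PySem

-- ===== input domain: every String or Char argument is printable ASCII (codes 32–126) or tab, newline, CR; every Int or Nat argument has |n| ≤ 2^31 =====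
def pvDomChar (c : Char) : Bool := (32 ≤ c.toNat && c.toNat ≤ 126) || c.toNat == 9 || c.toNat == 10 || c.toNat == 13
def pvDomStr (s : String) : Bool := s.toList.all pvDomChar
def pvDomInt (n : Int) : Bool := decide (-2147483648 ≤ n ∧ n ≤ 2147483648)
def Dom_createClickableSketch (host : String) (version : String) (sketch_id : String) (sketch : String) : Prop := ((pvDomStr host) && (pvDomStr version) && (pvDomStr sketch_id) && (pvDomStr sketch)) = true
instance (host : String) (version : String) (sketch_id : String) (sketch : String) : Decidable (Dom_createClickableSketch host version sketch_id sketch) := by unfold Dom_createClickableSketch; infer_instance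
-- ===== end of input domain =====

-- B replaces A's per-character loop by splitting on '?' and joining segments with anchors (objective: simpler).


-- ===== PORT A =====

def pvAnchor (host : String) (version : String) (sketch_id : String) (n : Int) : List Char :=
  "<a href=\"".toList ++ host.toList ++ "/oversynth/api/".toList ++ version.toList
    ++ "/sketches/".toList ++ sketch_id.toList ++ "/".toList
    ++ (PySem.Int.toStr n).toList ++ "\">?</a>".toList

def createClickableSketch (host : String) (version : String) (sketch_id : String) (sketch : String) : String :=
  let res := sketch.toList.foldl
    (fun (st : Int × List Char) ch =>
      if ch == '?' then (st.1 + 1, st.2 ++ pvAnchor host version sketch_id st.1)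
      else (st.1, st.2 ++ [ch]))
    (0, [])
  String.ofList res.2


-- ===== PORT B =====

def createClickableSketch_alt (host : String) (version : String) (sketch_id : String) (sketch : String) : String :=
  let parts := sketch.toList.splitOn '?'
  let pieces := parts.headD [] ::
    (PySem.List.enumerate parts.tail).flatMap
      (fun p => [pvAnchor host version sketch_id p.1, p.2])
  String.ofList pieces.flatten


-- ===== PRECONDITION & SPEC =====
def Spec_createClickableSketch (host : String) (version : String) (sketch_id : String) (sketch : String) (out : String) : Prop := out = createClickableSketch_alt host version sketch_id sketch
instance (host : String) (version : String) (sketch_id : String) (sketch : String) (out : String) : Decidable (Spec_createClickableSketch host version sketch_id sketch out) := by unfold Spec_createClickableSketch; infer_instance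

-- ===== CLAIM (what is proved, stated in full; the proofs are below) =====
def Claim_equal_createClickableSketch : Prop := ∀ (host : String) (version : String) (sketch_id : String) (sketch : String), Dom_createClickableSketch host version sketch_id sketch → Spec_createClickableSketch host version sketch_id sketch (createClickableSketch host version sketch_id sketch)

-- ===== LEMMAS AND PROOFS =====

-- pvGlueTail t c: the segments of t, each preceded by the anchor for its hole index (starting at c)
def pvGlueTail (host : String) (version : String) (sketch_id : String) : List (List Char) → Int → List Char
  | [], _ => []
  | h :: t, c => pvAnchor host version sketch_id c ++ h ++ pvGlueTail host version sketch_id t (c + 1)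

def pvGlue (host : String) (version : String) (sketch_id : String) (parts : List (List Char)) (c : Int) : List Char :=
  parts.headD [] ++ pvGlueTail host version sketch_id parts.tail c

lemma pvGlueTail_eq_enum (host version sketch_id : String) (t : List (List Char)) (c : Int) :
    ((PySem.List.enumerate t c).flatMap (fun p => [pvAnchor host version sketch_id p.1, p.2])).flatten
      = pvGlueTail host version sketch_id t c := by
  induction t generalizing c with
  | nil => simp [PySem.List.enumerate, pvGlueTail]
  | cons h t ih => simp [PySem.List.enumerate, pvGlueTail, ih]

lemma pvLoopA_eq_glue (host version sketch_id : String) (cs : List Char) (c : Int) (acc : List Char) :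
    (cs.foldl (fun (st : Int × List Char) ch =>
        if ch == '?' then (st.1 + 1, st.2 ++ pvAnchor host version sketch_id st.1)
        else (st.1, st.2 ++ [ch])) (c, acc)).2
      = acc ++ pvGlue host version sketch_id (cs.splitOn '?') c := by
  induction cs generalizing c acc with
  | nil => simp [List.splitOn, List.splitOnP_nil, pvGlue, pvGlueTail]
  | cons ch cs ih =>
    by_cases hch : ch = '?'
    · subst hch
      simp only [List.foldl_cons, beq_self_eq_true, if_true]
      rw [ih]
      obtain ⟨h, t, hht⟩ := List.exists_cons_of_ne_nil
        (List.splitOnP_ne_nil (fun x => x == '?') cs)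
      simp [List.splitOn, List.splitOnP_cons, hht, pvGlue, pvGlueTail]
    · have hb : (ch == '?') = false := beq_eq_false_iff_ne.mpr hch
      simp only [List.foldl_cons, hb, Bool.false_eq_true, if_false]
      rw [ih]
      obtain ⟨h, t, hht⟩ := List.exists_cons_of_ne_nil
        (List.splitOnP_ne_nil (fun x => x == '?') cs)
      simp [List.splitOn, List.splitOnP_cons, hch, hht, pvGlue]


-- ===== VERDICT (by name: the statement is the Claim_ definition above) =====
theorem createClickableSketch_spec : Claim_equal_createClickableSketch := by
  intro host version sketch_id sketch _
  unfold Spec_createClickableSketch createClickableSketch createClickableSketch_alt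
  simp only [List.flatten_cons, pvGlueTail_eq_enum, pvLoopA_eq_glue, pvGlue, List.nil_append]
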